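-- pv_equiv track=rewrite | github.com/aitorevi/extract-pdf-data | src/pdf_extractor.py | agrupar_paginas_por_factura
-- ===== SOURCE A (Python) =====
-- from typing import Dict, List, Any, Optional
--
-- def agrupar_paginas_por_factura(paginas_data: List[Dict]) -> Dict[str, List[Dict]]:
--     """
--     Agrupa páginas por número de factura.
--
--     Args:
--         paginas_data (List[Dict]): Lista de diccionarios con info de cada página
--                                    Cada dict debe tener: 'pagina_num', 'NumFactura'
--
--     Returns:
--         Dict[str, List[Dict]]: Diccionario con NumFactura como clave y lista de páginas como valor
--                                Las páginas sin NumFactura se agrupan bajo 'ERROR_SIN_NUMFACTURA'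
--     """
--     grupos = {}
--
--     for pagina_info in paginas_data:
--         num_factura = pagina_info.get('NumFactura')
--
--         # Si no hay NumFactura o está vacío, agrupar como error
--         if not num_factura or num_factura.strip() == '':
--             if 'ERROR_SIN_NUMFACTURA' not in grupos:
--                 grupos['ERROR_SIN_NUMFACTURA'] = []
--             grupos['ERROR_SIN_NUMFACTURA'].append(pagina_info)
--         else:
--             # Agrupar por NumFactura
--             if num_factura not in grupos:
--                 grupos[num_factura] = []
--             grupos[num_factura].append(pagina_info)
--
--     return grupos
-- ===== SOURCE B (Python) =====
-- from typing import Dict, List, Any, Optional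
--
--
-- def _clave(pagina_info):
--     num_factura = pagina_info.get('NumFactura')
--     if not num_factura or num_factura.strip() == '':
--         return 'ERROR_SIN_NUMFACTURA'
--     return num_factura
--
--
-- def agrupar_paginas_por_factura(paginas_data: List[Dict]) -> Dict[str, List[Dict]]:
--     """Agrupa por particiones sucesivas: extrae la clave de la primera pagina
--     pendiente, toma de una vez todas las paginas de esa clave y repite con el resto."""
--     resultado = {}
--     pendientes = paginas_data
--     while pendientes:
--         clave = _clave(pendientes[0])
--         resultado[clave] = [p for p in pendientes if _clave(p) == clave]
--         pendientes = [p for p in pendientes if _clave(p) != clave]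
--     return resultado
-- ===== Notes on version B (the rewrite author's own statement) =====
-- stated objective: alternative
-- what changed: Replaces A's single-pass dict-accumulation (append each page to its group as it is seen) by a partition sweep: repeatedly take the key of the first pending page, collect its whole group with one comprehension, and recurse on the remaining pages.
import Mathlib
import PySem

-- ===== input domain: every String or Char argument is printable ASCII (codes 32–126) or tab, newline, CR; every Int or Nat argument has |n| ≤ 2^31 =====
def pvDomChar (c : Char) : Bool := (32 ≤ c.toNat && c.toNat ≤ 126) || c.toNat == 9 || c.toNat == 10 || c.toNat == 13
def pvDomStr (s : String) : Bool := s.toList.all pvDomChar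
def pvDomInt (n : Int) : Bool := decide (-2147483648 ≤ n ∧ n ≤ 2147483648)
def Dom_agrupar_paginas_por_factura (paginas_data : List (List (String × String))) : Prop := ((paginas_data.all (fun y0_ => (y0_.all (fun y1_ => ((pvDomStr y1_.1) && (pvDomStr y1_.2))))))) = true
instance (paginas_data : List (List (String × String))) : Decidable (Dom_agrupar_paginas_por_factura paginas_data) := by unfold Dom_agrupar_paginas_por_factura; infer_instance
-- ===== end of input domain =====

-- B replaces A's single-pass dict accumulation by a partition sweep (take the whole
-- group of the first pending page at once, repeat on the rest): an alternative
-- decomposition of the same grouping, same result.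

-- ===== PORT A =====
-- A: one fold over the pages, appending each page to its group in an insertion-ordered
-- dict (grupos[k] = grupos.get(k, []) + [page], which is A's "if k not in grupos: grupos[k] = []"
-- followed by append — exactly PySem.Dict.modify k [] (· ++ [page])).
def agrupar_paginas_por_factura (paginas_data : List (List (String × String))) : List (String × List (List (String × String))) :=
  (paginas_data.foldl
    (fun grupos pagina_info =>
      match List.lookup "NumFactura" pagina_info with
      | none =>
          grupos.modify "ERROR_SIN_NUMFACTURA" [] (fun g => g ++ [pagina_info])
      | some num_factura =>
          if num_factura == "" || PySem.Str.strip num_factura == "" then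
            grupos.modify "ERROR_SIN_NUMFACTURA" [] (fun g => g ++ [pagina_info])
          else
            grupos.modify num_factura [] (fun g => g ++ [pagina_info]))
    PySem.Dict.empty).items

-- ===== PORT B =====
-- B's helper _clave: the group key of one page.
def clave (pagina_info : List (String × String)) : String :=
  match List.lookup "NumFactura" pagina_info with
  | none => "ERROR_SIN_NUMFACTURA"
  | some num_factura =>
      if num_factura == "" || PySem.Str.strip num_factura == "" then "ERROR_SIN_NUMFACTURA"
      else num_factura

-- B's while loop: resultado accumulates finished groups, pendientes shrinks.
def bucle (resultado : List (String × List (List (String × String))))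
    (pendientes : List (List (String × String))) : List (String × List (List (String × String))) :=
  match pendientes with
  | [] => resultado
  | p :: resto =>
      bucle (resultado ++ [(clave p, (p :: resto).filter (fun q => clave q == clave p))])
            (resto.filter (fun q => clave q != clave p))
termination_by pendientes.length
decreasing_by
  simp only [List.length_unattach, List.length_cons, Nat.lt_succ_iff]
  exact le_trans (List.length_filter_le _ _) (by simp)

def agrupar_paginas_por_factura_alt (paginas_data : List (List (String × String))) : List (String × List (List (String × String))) :=
  bucle [] paginas_data

-- ===== PRECONDITION & SPEC =====
def Spec_agrupar_paginas_por_factura (paginas_data : List (List (String × String))) (out : List (String × List (List (String × String)))) : Prop := out = agrupar_paginas_por_factura_alt paginas_data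
instance (paginas_data : List (List (String × String))) (out : List (String × List (List (String × String)))) : Decidable (Spec_agrupar_paginas_por_factura paginas_data out) := by unfold Spec_agrupar_paginas_por_factura; infer_instance

-- ===== CLAIM (what is proved, stated in full; the proofs are below) =====
def Claim_equal_agrupar_paginas_por_factura : Prop := ∀ (paginas_data : List (List (String × String))), Dom_agrupar_paginas_por_factura paginas_data → Spec_agrupar_paginas_por_factura paginas_data (agrupar_paginas_por_factura paginas_data)

-- ===== LEMMAS AND PROOFS =====

-- The common grouping both programs compute: distinct keys in first-occurrence order,
-- each paired with the pages of that key in original order.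
def grupoSpec (xs : List (List (String × String))) : List (String × List (List (String × String))) :=
  (PySem.Set.ofList (xs.map clave)).map (fun k => (k, xs.filter (fun q => clave q == k)))

-- ordered dedup commutes with filter
theorem ofList_filter {α : Type} [BEq α] [LawfulBEq α] (p : α → Bool) (l : List α) :
    (PySem.Set.ofList l).filter p = PySem.Set.ofList (l.filter p) := by
  induction l with
  | nil => rfl
  | cons x l ih =>
      rw [PySem.Set.ofList_cons]
      by_cases hx : p x = true
      · rw [List.filter_cons_of_pos hx, List.filter_cons_of_pos hx, PySem.Set.ofList_cons]
        congr 1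
        unfold PySem.Set.discard
        rw [List.filter_comm, ih]
      · rw [List.filter_cons_of_neg hx, List.filter_cons_of_neg hx]
        unfold PySem.Set.discard
        rw [List.filter_comm, ih]
        apply List.filter_eq_self.mpr
        intro a ha
        have hpa : p a = true :=
          (List.mem_filter.mp ((PySem.Set.mem_ofList _ _).mp ha)).2
        simp only [ne_eq, Bool.not_eq_eq_eq_not, Bool.not_true, beq_eq_false_iff_ne]
        intro h; rw [h] at hpa; exact hx hpa

theorem grupoSpec_nil : grupoSpec [] = [] := rfl

theorem grupoSpec_cons (p : List (String × String)) (resto : List (List (String × String))) :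
    grupoSpec (p :: resto) =
      (clave p, (p :: resto).filter (fun q => clave q == clave p)) ::
        grupoSpec (resto.filter (fun q => clave q != clave p)) := by
  unfold grupoSpec
  have hkeys : PySem.Set.ofList ((p :: resto).map clave)
      = clave p :: PySem.Set.ofList ((resto.filter (fun q => clave q != clave p)).map clave) := by
    rw [List.map_cons, PySem.Set.ofList_cons]
    unfold PySem.Set.discard
    rw [ofList_filter]
    congr 1
    rw [List.filter_map]
    rfl
  rw [hkeys, List.map_cons]
  congr 1
  apply List.map_congr_left
  intro k hk
  have hkne : k ≠ clave p := by
    have hmem : k ∈ (resto.filter (fun q => clave q != clave p)).map clave :=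
      (PySem.Set.mem_ofList _ _).mp hk
    obtain ⟨q, hq, hkq⟩ := List.mem_map.mp hmem
    have h2 := (List.mem_filter.mp hq).2
    subst hkq
    simpa using h2
  congr 1
  rw [List.filter_cons_of_neg (by simpa using fun h => hkne h.symm)]
  rw [List.filter_filter]
  apply List.filter_congr
  intro q _
  by_cases h : clave q = k
  · simp [h, hkne]
  · simp [h]

theorem bucle_eq (n : Nat) : ∀ (xs : List (List (String × String))), xs.length ≤ n →
    ∀ res, bucle res xs = res ++ grupoSpec xs := by
  induction n with
  | zero =>
      intro xs h res
      have : xs = [] := List.eq_nil_of_length_eq_zero (Nat.le_zero.mp h)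
      subst this
      simp [bucle, grupoSpec_nil]
  | succ n ih =>
      intro xs h res
      match xs with
      | [] => simp [bucle, grupoSpec_nil]
      | p :: resto =>
          rw [bucle, grupoSpec_cons]
          rw [ih (resto.filter (fun q => clave q != clave p))
                (le_trans (List.length_filter_le _ _) (Nat.le_of_succ_le_succ h)) _]
          simp

theorem bodyA_eq (grupos : PySem.Dict String (List (List (String × String))))
    (pagina_info : List (String × String)) :
    (match List.lookup "NumFactura" pagina_info with
      | none =>
          grupos.modify "ERROR_SIN_NUMFACTURA" [] (fun g => g ++ [pagina_info])
      | some num_factura =>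
          if num_factura == "" || PySem.Str.strip num_factura == "" then
            grupos.modify "ERROR_SIN_NUMFACTURA" [] (fun g => g ++ [pagina_info])
          else
            grupos.modify num_factura [] (fun g => g ++ [pagina_info]))
    = grupos.modify (clave pagina_info) [] (fun g => g ++ [pagina_info]) := by
  unfold clave
  cases List.lookup "NumFactura" pagina_info with
  | none => rfl
  | some nf =>
      by_cases h : (nf == "" || PySem.Str.strip nf == "") = true
      · simp only [h, if_true]
      · simp [eq_false_of_ne_true h]

theorem A_eq_grupoSpec (xs : List (List (String × String))) :
    agrupar_paginas_por_factura xs = grupoSpec xs := by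
  unfold agrupar_paginas_por_factura
  have hb : xs.foldl
      (fun grupos pagina_info =>
        match List.lookup "NumFactura" pagina_info with
        | none =>
            grupos.modify "ERROR_SIN_NUMFACTURA" [] (fun g => g ++ [pagina_info])
        | some num_factura =>
            if num_factura == "" || PySem.Str.strip num_factura == "" then
              grupos.modify "ERROR_SIN_NUMFACTURA" [] (fun g => g ++ [pagina_info])
            else
              grupos.modify num_factura [] (fun g => g ++ [pagina_info]))
      PySem.Dict.empty
      = xs.foldl (fun grupos p => grupos.modify (clave p) [] (fun g => g ++ [p])) PySem.Dict.empty := by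
    apply PySem.List.foldl_congr_mem
    intro d p _
    exact bodyA_eq d p
  rw [hb]
  set dA := xs.foldl (fun grupos p => grupos.modify (clave p) [] (fun g => g ++ [p])) PySem.Dict.empty with hdA
  have hnd : dA.keys.Nodup := by
    have := PySem.Dict.nodup_keys_foldl_modify_key xs clave ([]) (fun _ p g => g ++ [p])
      PySem.Dict.empty (by simp [PySem.Dict.keys_empty])
    simpa using this
  have hkeys : dA.keys = PySem.Set.ofList (xs.map clave) := by
    have := PySem.Dict.keys_foldl_modify_key xs clave ([]) (fun _ p g => g ++ [p]) PySem.Dict.empty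
    simpa [PySem.Dict.keys_empty, PySem.Set.update_nil_left] using this
  have hget : ∀ c, dA.getD c [] = xs.filter (fun q => clave q == c) := by
    intro c
    have h := PySem.Dict.getD_foldl_modify_append (xs.map (fun p => (clave p, p)))
      PySem.Dict.empty c
    rw [List.foldl_map, List.filter_map] at h
    simp only [Function.comp_def, List.map_map] at h
    simpa [PySem.Dict.getD_empty] using h
  rw [PySem.Dict.items_eq_map_keys dA hnd [], hkeys]
  unfold grupoSpec
  apply List.map_congr_left
  intro k _
  rw [hget k]

-- ===== VERDICT (by name: the statement is the Claim_ definition above) =====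
theorem agrupar_paginas_por_factura_spec : Claim_equal_agrupar_paginas_por_factura := by
  intro xs _
  unfold Spec_agrupar_paginas_por_factura agrupar_paginas_por_factura_alt
  rw [A_eq_grupoSpec, bucle_eq xs.length xs (Nat.le_refl _) []]
  simp
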